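-- pv_equiv track=rewrite | github.com/Karatheon1001/python | ex4test.py | NonAlpha
-- ===== SOURCE A (Python) =====
-- def Surrounded (word,index):
--     if index == 0 or index == len(word)-1:
--         return False
--     return word[index-1].isalpha() and word[index+1].isalpha()
--
-- def NonAlpha (data):
--     FinalList=[]
--     for word in data:
--         for index, letter in enumerate(word):
--
--             if not letter.isalpha():
--                 if Surrounded(word,index):
--                     FinalList.append(letter)
--
--
--
--     return FinalList
-- ===== SOURCE B (Python) =====
-- def _runs(s):
--     # split s into maximal runs of equal isalpha()-class: [(key, chars), ...]
--     if not s: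
--         return []
--     key = s[0].isalpha()
--     i = 1
--     while i < len(s) and s[i].isalpha() == key:
--         i += 1
--     return [(key, s[:i])] + _runs(s[i:])
--
--
-- def NonAlpha(data):
--     # Run-length decomposition: a character qualifies exactly when it forms an
--     # isolated (length-1) non-alpha run that is neither the first nor the last
--     # run of its word (runs alternate, so its neighbours are alpha runs).
--     out = []
--     for word in data:
--         for key, group in _runs(list(word))[1:][:-1]:
--             if not key and len(group) == 1:
--                 out.append(group[0])
--     return out
-- ===== Notes on version B (the rewrite author's own statement) =====
-- stated objective: alternative
-- what changed: Replaced the per-character Surrounded window test with a run-length decomposition: each word is split into maximal runs of equal isalpha()-class, and B emits exactly the interior length-1 non-alpha runs (alternation guarantees their neighbours are alpha runs).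
import Mathlib
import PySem

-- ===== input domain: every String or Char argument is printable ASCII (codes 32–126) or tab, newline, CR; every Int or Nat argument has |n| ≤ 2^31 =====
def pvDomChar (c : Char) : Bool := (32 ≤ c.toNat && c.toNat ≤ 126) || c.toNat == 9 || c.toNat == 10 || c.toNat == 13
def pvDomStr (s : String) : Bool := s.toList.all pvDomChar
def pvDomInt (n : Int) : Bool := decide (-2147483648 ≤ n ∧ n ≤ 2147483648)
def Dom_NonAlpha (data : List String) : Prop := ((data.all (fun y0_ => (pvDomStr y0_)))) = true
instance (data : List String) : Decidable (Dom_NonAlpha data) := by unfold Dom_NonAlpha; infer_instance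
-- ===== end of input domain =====

-- B replaces the per-character Surrounded window test by a run-length decomposition:
-- split each word into maximal runs of equal isalpha()-class and emit the interior
-- length-1 non-alpha runs. Same cost, a genuinely different algorithm.

-- ===== PORT A =====
-- word[index-1] / word[index+1] via pyGet?; the 'false' fallback arm is unreachable
-- (the guard ensures both indices are in range), matching Python's in-range access.
def Surrounded (word : List Char) (index : Int) : Bool :=
  if index == 0 || index == (word.length : Int) - 1 then false
  else
    match PySem.List.pyGet? word (index - 1), PySem.List.pyGet? word (index + 1) with
    | some p, some n => PySem.Chars.isalpha p && PySem.Chars.isalpha n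
    | _, _ => false

def NonAlpha (data : List String) : List String :=
  data.foldl (fun FinalList word =>
    (PySem.List.enumerate word.toList 0).foldl (fun FL ic =>
      if !PySem.Chars.isalpha ic.2 then
        if Surrounded word.toList ic.1 then FL ++ [String.ofList [ic.2]] else FL
      else FL) FinalList) []

-- ===== PORT B =====
-- _runs: the index loop computing i is a span: s[:i] = s[0] :: takeWhile of the tail,
-- s[i:] = dropWhile of the tail (exact for every input).
def runsOf (s : List Char) : List (Bool × List Char) :=
  match s with
  | [] => []
  | a :: t =>
    (PySem.Chars.isalpha a,
      a :: t.takeWhile (fun c => PySem.Chars.isalpha c == PySem.Chars.isalpha a)) ::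
    runsOf (t.dropWhile (fun c => PySem.Chars.isalpha c == PySem.Chars.isalpha a))
termination_by s.length
decreasing_by
  simp only [List.length_cons]
  exact Nat.lt_succ_of_le (List.length_dropWhile_le _ _)

-- runs[1:][:-1] via slice; group[0] via headD (in range: the guard fixes len(group) == 1)
def NonAlpha_alt (data : List String) : List String :=
  data.foldl (fun out word =>
    (PySem.List.slice (PySem.List.slice (runsOf word.toList) (some 1) none) none (some (-1))).foldl
      (fun o kg =>
        if !kg.1 && kg.2.length == 1 then o ++ [String.ofList [kg.2.headD ' ']] else o)
      out) []

-- ===== PRECONDITION & SPEC =====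
def Spec_NonAlpha (data : List String) (out : List String) : Prop := out = NonAlpha_alt data
instance (data : List String) (out : List String) : Decidable (Spec_NonAlpha data out) := by unfold Spec_NonAlpha; infer_instance

-- ===== CLAIM (what is proved, stated in full; the proofs are below) =====
def Claim_equal_NonAlpha : Prop := ∀ (data : List String), Dom_NonAlpha data → Spec_NonAlpha data (NonAlpha data)

-- ===== LEMMAS AND PROOFS =====

-- ---- A-side characterization: per word, A collects the middles of the alpha/non-alpha/alpha windows ----

-- triple-windows of a list
def zipW (L : List Char) : List (Char × Char × Char) :=
  L.zip ((L.drop 1).zip (L.drop 2))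

def qB (t : Char × Char × Char) : Bool :=
  !PySem.Chars.isalpha t.2.1 && (PySem.Chars.isalpha t.1 && PySem.Chars.isalpha t.2.2)

def fB (t : Char × Char × Char) : String := String.ofList [t.2.1]

-- the common value both per-word computations are reduced to
def W (L : List Char) : List String := ((zipW L).filter qB).map fB

lemma zipW_cons3 (a b c : Char) (t : List Char) :
    zipW (a :: b :: c :: t) = (a, b, c) :: zipW (b :: c :: t) := by
  simp [zipW]

lemma W_cons3 (a b c : Char) (t : List Char) :
    W (a :: b :: c :: t) = (if qB (a, b, c) then [fB (a, b, c)] else []) ++ W (b :: c :: t) := by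
  rw [W, zipW_cons3]
  by_cases h : qB (a, b, c) <;> simp [h, W]

-- A's inner loop over one word, with accumulator
def innerA (L : List Char) (acc : List String) : List String :=
  (PySem.List.enumerate L 0).foldl (fun FL ic =>
    if !PySem.Chars.isalpha ic.2 then
      if Surrounded L ic.1 then FL ++ [String.ofList [ic.2]] else FL
    else FL) acc

def pA (L : List Char) (ic : Int × Char) : Bool :=
  !PySem.Chars.isalpha ic.2 && Surrounded L ic.1

def fA (ic : Int × Char) : String := String.ofList [ic.2]

lemma innerA_eq (L : List Char) (acc : List String) :
    innerA L acc = acc ++ ((PySem.List.enumerate L 0).filter (pA L)).map fA := by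
  have hfun : (fun (FL : List String) (ic : Int × Char) =>
      if !PySem.Chars.isalpha ic.2 then
        if Surrounded L ic.1 then FL ++ [String.ofList [ic.2]] else FL
      else FL)
      = (fun FL ic => if pA L ic then FL ++ [fA ic] else FL) := by
    funext FL ic
    by_cases h1 : PySem.Chars.isalpha ic.2 <;> by_cases h2 : Surrounded L ic.1 <;>
      simp [pA, fA, h1, h2]
  rw [innerA, hfun]
  exact PySem.List.foldl_append_if (pA L) fA _ _

-- key stepdown lemma: from index k ≥ 1 on, A's filtered enumerate matches the windows
lemma step (L : List Char) : ∀ (d k : Nat), k + d = L.length → 1 ≤ k →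
    ((PySem.List.enumerate (L.drop k) (k : Int)).filter (pA L)).map fA
      = ((zipW (L.drop (k - 1))).filter qB).map fB := by
  intro d
  induction d with
  | zero =>
    intro k hk h1
    have hdrop : L.drop k = [] := by
      apply List.drop_eq_nil_of_le; omega
    have hdrop1 : (L.drop (k - 1)).drop 1 = [] := by
      rw [List.drop_drop]
      apply List.drop_eq_nil_of_le; omega
    simp [hdrop, zipW, hdrop1]
  | succ d ih =>
    intro k hk h1
    have hkL : k < L.length := by omega
    have hk1L : k - 1 < L.length := by omega
    have hdropk : L.drop k = L[k] :: L.drop (k + 1) := List.drop_eq_getElem_cons hkL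
    have hdropk1 : L.drop (k - 1) = L[k - 1] :: L.drop k := by
      have := List.drop_eq_getElem_cons hk1L
      rwa [show k - 1 + 1 = k by omega] at this
    by_cases hd : d = 0
    · -- k is the last index: Surrounded is false and there is no full window
      subst hd
      have hlast : L.drop (k + 1) = [] := by
        apply List.drop_eq_nil_of_le; omega
      have hsur : Surrounded L (k : Int) = false := by
        unfold Surrounded
        have : (k : Int) == (L.length : Int) - 1 := by
          simp [BEq.beq]; omega
        simp [this]
      simp [hdropk, PySem.List.enumerate, hlast, pA, hsur, hdropk1, zipW]
    · -- a full window (L[k-1], L[k], L[k+1]) exists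
      have hk1L' : k + 1 < L.length := by omega
      have hdropk2 : L.drop (k + 1) = L[k + 1] :: L.drop (k + 2) := List.drop_eq_getElem_cons hk1L'
      have hwin : zipW (L.drop (k - 1)) = (L[k - 1], L[k], L[k + 1]) :: zipW (L.drop k) := by
        rw [hdropk1, hdropk, hdropk2, zipW_cons3, ← hdropk2, ← hdropk]
      have hsur : Surrounded L (k : Int) = (PySem.Chars.isalpha L[k - 1] && PySem.Chars.isalpha L[k + 1]) := by
        unfold Surrounded
        have hne0 : ((k : Int) == 0) = false := by simp [BEq.beq]; omega
        have hneN : ((k : Int) == (L.length : Int) - 1) = false := by simp [BEq.beq]; omega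
        have hget1 : PySem.List.pyGet? L ((k : Int) - 1) = some L[k - 1] := by
          rw [show (k : Int) - 1 = ((k - 1 : Nat) : Int) by omega]
          rw [PySem.List.pyGet?_natCast]
          simp [List.getElem?_eq_getElem hk1L]
        have hget2 : PySem.List.pyGet? L ((k : Int) + 1) = some L[k + 1] := by
          rw [show (k : Int) + 1 = ((k + 1 : Nat) : Int) by omega]
          rw [PySem.List.pyGet?_natCast]
          simp [List.getElem?_eq_getElem hk1L']
        simp [hne0, hneN, hget1, hget2]
      have ihk : ((PySem.List.enumerate (L.drop (k + 1)) ((k + 1 : Nat) : Int)).filter (pA L)).map fA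
          = ((zipW (L.drop (k + 1 - 1))).filter qB).map fB := ih (k + 1) (by omega) (by omega)
      rw [hdropk, hwin]
      have henum : PySem.List.enumerate (L[k] :: L.drop (k + 1)) (k : Int)
          = ((k : Int), L[k]) :: PySem.List.enumerate (L.drop (k + 1)) ((k : Int) + 1) := by
        rw [PySem.List.enumerate_cons]
      rw [henum]
      have hcast : ((k : Int) + 1) = ((k + 1 : Nat) : Int) := by omega
      rw [hcast]
      have hpq : pA L ((k : Int), L[k]) = qB (L[k - 1], L[k], L[k + 1]) := by
        simp [pA, qB, hsur]
      by_cases hc : qB (L[k - 1], L[k], L[k + 1])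
      · rw [List.filter_cons_of_pos (by rw [hpq]; exact hc), List.filter_cons_of_pos hc]
        simp only [List.map_cons]
        rw [ihk]
        simp [fA, fB, show k + 1 - 1 = k from by omega]
      · rw [List.filter_cons_of_neg (by rw [hpq]; simpa using hc), List.filter_cons_of_neg (by simpa using hc)]
        rw [ihk]
        simp [show k + 1 - 1 = k from by omega]

lemma word_eq (L : List Char) :
    ((PySem.List.enumerate L 0).filter (pA L)).map fA = W L := by
  cases hL : L with
  | nil => simp [PySem.List.enumerate, W, zipW]
  | cons a t =>
    have hlen : 1 ≤ L.length := by rw [hL]; simp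
    have h0 : L.drop 1 = t := by rw [hL]; rfl
    have hsur0 : Surrounded L 0 = false := by unfold Surrounded; simp
    have hstep := step L (L.length - 1) 1 (by omega) (le_refl 1)
    have henum : PySem.List.enumerate L 0 = ((0 : Int), a) :: PySem.List.enumerate t 1 := by
      rw [hL]; simp [PySem.List.enumerate_cons]
    rw [← hL, henum]
    have hp0 : pA L ((0 : Int), a) = false := by simp [pA, hsur0]
    rw [List.filter_cons_of_neg (by simp [hp0])]
    have hd0 : L.drop (1 - 1) = L := by simp
    rw [h0] at hstep
    rw [hd0] at hstep
    have : PySem.List.enumerate t 1 = PySem.List.enumerate t ((1 : Nat) : Int) := by norm_num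
    rw [this, hstep, W]

-- ---- B-side characterization: interior length-1 non-alpha runs are exactly the windows ----

def pr (kg : Bool × List Char) : Bool := !kg.1 && kg.2.length == 1

def fr (kg : Bool × List Char) : String := String.ofList [kg.2.headD ' ']

-- B per word after the fold is rewritten: filter/map over all-but-last of a run list
def pickMid (R : List (Bool × List Char)) : List String := (R.dropLast.filter pr).map fr

-- skipping a homogeneous run only changes the left context to its last character
lemma W_skip : ∀ (g : List Char) (a : Char) (rest : List Char) (k : Bool),
    PySem.Chars.isalpha a = k → (∀ y ∈ g, PySem.Chars.isalpha y = k) →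
    W (a :: (g ++ rest)) = W (g.getLastD a :: rest) := by
  intro g
  induction g with
  | nil => intro a rest k _ _; simp
  | cons b g' ih =>
    intro a rest k ha hm
    have hb : PySem.Chars.isalpha b = k := hm b (by simp)
    have hm' : ∀ y ∈ g', PySem.Chars.isalpha y = k := fun y hy => hm y (by simp [hy])
    have hlast : (b :: g').getLastD a = g'.getLastD b := List.getLastD_cons
    rw [hlast]
    cases hX : g' ++ rest with
    | nil =>
      have hg' : g' = [] := by cases g' <;> simp_all
      have hr : rest = [] := by cases rest <;> simp_all
      subst hg'; subst hr
      simp [W, zipW]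
    | cons z t =>
      have h3 : W (a :: b :: (g' ++ rest)) = (if qB (a, b, z) then [fB (a, b, z)] else []) ++ W (b :: (g' ++ rest)) := by
        rw [hX, W_cons3]
      have hq : qB (a, b, z) = false := by
        cases k <;> simp [qB, ha, hb]
      rw [List.cons_append, h3, hq]
      simpa using ih b rest k hb hm'
lemma W_single (c : Char) : W [c] = [] := by simp [W, zipW]

-- the boundary step: one run (key kx) after a context of the opposite key
lemma W_run (p x : Char) (tw td : List Char) (kx : Bool)
    (hp : PySem.Chars.isalpha p = !kx) (hx : PySem.Chars.isalpha x = kx)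
    (htw : ∀ y ∈ tw, PySem.Chars.isalpha y = kx)
    (htd : ∀ c, td.head? = some c → PySem.Chars.isalpha c = !kx) :
    W (p :: x :: (tw ++ td)) =
      (if kx = false ∧ tw = [] ∧ td ≠ [] then [String.ofList [x]] else []) ++ W (tw.getLastD x :: td) := by
  cases tw with
  | nil =>
    cases td with
    | nil => simp [W, zipW]
    | cons r t' =>
      have hr : PySem.Chars.isalpha r = !kx := htd r rfl
      have h3 : W (p :: x :: ([] ++ r :: t')) = (if qB (p, x, r) then [fB (p, x, r)] else []) ++ W (x :: r :: t') := by
        simp only [List.nil_append]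
        rw [W_cons3]
      rw [h3]
      have hq : qB (p, x, r) = (kx == false) := by
        cases kx <;> simp [qB, hp, hx, hr]
      cases hkx : kx <;> simp_all [fB]
  | cons w tw' =>
    have hw : PySem.Chars.isalpha w = kx := htw w (by simp)
    have htw' : ∀ y ∈ tw', PySem.Chars.isalpha y = kx := fun y hy => htw y (by simp [hy])
    have h3 : W (p :: x :: ((w :: tw') ++ td)) = (if qB (p, x, w) then [fB (p, x, w)] else []) ++ W (x :: (w :: tw') ++ td) := by
      simp only [List.cons_append]
      rw [W_cons3]
    have hq : qB (p, x, w) = false := by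
      cases kx <;> simp [qB, hp, hx, hw]
    rw [h3, hq]
    have hskip := W_skip (w :: tw') x td kx hx htw
    simp only [List.cons_append] at hskip ⊢
    rw [hskip, List.getLastD_cons]
    simp

lemma runsOf_cons (x : Char) (t : List Char) :
    runsOf (x :: t) =
      (PySem.Chars.isalpha x,
        x :: t.takeWhile (fun c => PySem.Chars.isalpha c == PySem.Chars.isalpha x)) ::
      runsOf (t.dropWhile (fun c => PySem.Chars.isalpha c == PySem.Chars.isalpha x)) := by
  rw [runsOf]

lemma mem_takeWhile_key (t : List Char) (k : Bool) :
    ∀ y ∈ t.takeWhile (fun c => PySem.Chars.isalpha c == k), PySem.Chars.isalpha y = k := by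
  intro y hy
  have := List.mem_takeWhile_imp hy
  simpa using this

lemma head_dropWhile_false (p : Char → Bool) : ∀ (t : List Char) (c : Char),
    (t.dropWhile p).head? = some c → p c = false := by
  intro t
  induction t with
  | nil => intro c hc; simp at hc
  | cons a t ih =>
    intro c hc
    by_cases hpa : p a
    · rw [List.dropWhile_cons_of_pos hpa] at hc
      exact ih c hc
    · rw [List.dropWhile_cons_of_neg hpa] at hc
      simp at hc
      rw [← hc]
      simpa using hpa

lemma head_dropWhile_key (t : List Char) (k : Bool) :
    ∀ c, (t.dropWhile (fun c => PySem.Chars.isalpha c == k)).head? = some c →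
      PySem.Chars.isalpha c = !k := by
  intro c hc
  have := head_dropWhile_false (fun c => PySem.Chars.isalpha c == k) t c hc
  cases k <;> simp_all

lemma getLastD_key : ∀ (tw : List Char) (x : Char) (k : Bool),
    PySem.Chars.isalpha x = k → (∀ y ∈ tw, PySem.Chars.isalpha y = k) →
    PySem.Chars.isalpha (tw.getLastD x) = k := by
  intro tw
  induction tw with
  | nil => intro x k hx _; simpa using hx
  | cons w tw' ih =>
    intro x k _ htw
    rw [List.getLastD_cons]
    exact ih w k (htw w (by simp)) (fun y hy => htw y (by simp [hy]))

-- the central lemma: all-but-last runs of s', picked, are the windows of p :: s'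
lemma pickMid_eq : ∀ (n : Nat) (s' : List Char) (p : Char), s'.length ≤ n →
    (∀ c, s'.head? = some c → PySem.Chars.isalpha c = !PySem.Chars.isalpha p) →
    pickMid (runsOf s') = W (p :: s') := by
  intro n
  induction n with
  | zero =>
    intro s' p hlen _
    have : s' = [] := List.length_eq_zero_iff.mp (Nat.le_zero.mp hlen)
    subst this
    simp [runsOf, pickMid, W_single]
  | succ n ih =>
    intro s' p hlen hhead
    cases hs : s' with
    | nil => simp [runsOf, pickMid, W_single]
    | cons x t =>
      subst hs
      set kx := PySem.Chars.isalpha x with hkx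
      have hp : PySem.Chars.isalpha p = !kx := by
        have := hhead x rfl
        cases h : PySem.Chars.isalpha p <;> simp_all
      set tw := t.takeWhile (fun c => PySem.Chars.isalpha c == kx) with htwdef
      set td := t.dropWhile (fun c => PySem.Chars.isalpha c == kx) with htddef
      have ht : t = tw ++ td := (List.takeWhile_append_dropWhile).symm
      have htw : ∀ y ∈ tw, PySem.Chars.isalpha y = kx := mem_takeWhile_key t kx
      have htd : ∀ c, td.head? = some c → PySem.Chars.isalpha c = !kx := head_dropWhile_key t kx
      have hrun := W_run p x tw td kx hp rfl htw htd
      rw [runsOf_cons]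
      cases htd' : td with
      | nil =>
        have : runsOf td = [] := by rw [htd']; rw [runsOf]
        rw [← htddef, ← htwdef, ← hkx, this]
        simp only [pickMid, List.dropLast_singleton, List.filter_nil, List.map_nil]
        rw [show (x :: t : List Char) = x :: (tw ++ td) from by rw [← ht]]
        rw [hrun, htd']
        simp [W_single]
      | cons r t' =>
        have hrne : runsOf td ≠ [] := by rw [htd', runsOf_cons]; simp
        rw [← htddef, ← htwdef, ← hkx]
        have hdrop : ((kx, x :: tw) :: runsOf td).dropLast = (kx, x :: tw) :: (runsOf td).dropLast :=
          List.dropLast_cons_of_ne_nil hrne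
        have hq : PySem.Chars.isalpha (tw.getLastD x) = kx := getLastD_key tw x kx rfl htw
        have hih : pickMid (runsOf td) = W (tw.getLastD x :: td) := by
          apply ih td (tw.getLastD x)
          · have h1 : td.length ≤ t.length := by
              rw [htddef]; exact List.length_dropWhile_le _ _
            simp only [List.length_cons] at hlen
            omega
          · intro c hc
            rw [hq]
            exact htd c hc
        rw [pickMid, hdrop]
        rw [show (x :: t : List Char) = x :: (tw ++ td) from by rw [← ht]]
        rw [hrun]
        have hsplit : ((((kx, x :: tw) :: (runsOf td).dropLast)).filter pr).map fr
            = (if pr (kx, x :: tw) then [fr (kx, x :: tw)] else []) ++ pickMid (runsOf td) := by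
          by_cases h : pr (kx, x :: tw)
          · rw [List.filter_cons_of_pos h]; simp [h, pickMid]
          · rw [List.filter_cons_of_neg (by simpa using h)]; simp [h, pickMid]
        rw [hsplit, hih]
        congr 1
        have hcond : pr (kx, x :: tw) = ((kx = false ∧ tw = [] ∧ td ≠ []) : Prop) := by
          have : td ≠ [] := by rw [htd']; simp
          cases kx <;> cases htw'' : tw <;> simp [pr, this]
        by_cases h : kx = false ∧ tw = [] ∧ td ≠ []
        · rw [if_pos h]
          have hprt : pr (kx, x :: tw) = true := by rw [hcond]; simpa using h
          rw [if_pos hprt]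
          rcases h with ⟨_, htw0, _⟩
          simp [fr, htw0]
        · rw [if_neg h]
          have hprt : pr (kx, x :: tw) = false := by
            have hnot : ¬ (pr (kx, x :: tw) = true) := by rw [hcond]; exact h
            simpa using hnot
          simp [hprt]

-- B per word, directly from the port's slices and fold
lemma wordB_eq (L : List Char) (acc : List String) :
    (PySem.List.slice (PySem.List.slice (runsOf L) (some 1) none) none (some (-1))).foldl
      (fun o kg => if !kg.1 && kg.2.length == 1 then o ++ [String.ofList [kg.2.headD ' ']] else o) acc
    = acc ++ pickMid ((runsOf L).tail) := by
  rw [PySem.List.slice_from_one, PySem.List.slice_to_neg_one]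
  have hfun : (fun (o : List String) (kg : Bool × List Char) =>
      if !kg.1 && kg.2.length == 1 then o ++ [String.ofList [kg.2.headD ' ']] else o)
      = (fun o kg => if pr kg then o ++ [fr kg] else o) := by
    funext o kg; simp [pr, fr]
  rw [hfun, PySem.List.foldl_append_if pr fr _ _, pickMid]

-- per word: B's picked interior runs are the windows (= A's per-word value)
lemma perword_eq (L : List Char) : pickMid ((runsOf L).tail) = W L := by
  cases hL : L with
  | nil => simp [runsOf, pickMid, W, zipW]
  | cons x t =>
    rw [runsOf_cons, List.tail_cons]
    set kx := PySem.Chars.isalpha x with hkx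
    set tw := t.takeWhile (fun c => PySem.Chars.isalpha c == kx) with htwdef
    set td := t.dropWhile (fun c => PySem.Chars.isalpha c == kx) with htddef
    have ht : t = tw ++ td := (List.takeWhile_append_dropWhile).symm
    have htw : ∀ y ∈ tw, PySem.Chars.isalpha y = kx := mem_takeWhile_key t kx
    have htd : ∀ c, td.head? = some c → PySem.Chars.isalpha c = !kx := head_dropWhile_key t kx
    have hq : PySem.Chars.isalpha (tw.getLastD x) = kx := getLastD_key tw x kx rfl htw
    have hmid : pickMid (runsOf td) = W (tw.getLastD x :: td) := by
      apply pickMid_eq td.length td (tw.getLastD x) (le_refl _)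
      intro c hc; rw [hq]; exact htd c hc
    rw [hmid]
    have hskip := W_skip tw x td kx rfl htw
    rw [show (x :: t : List Char) = x :: (tw ++ td) from by rw [← ht]]
    exact hskip.symm

lemma main_eq (data : List String) : NonAlpha data = NonAlpha_alt data := by
  unfold NonAlpha NonAlpha_alt
  induction data using List.reverseRecOn with
  | nil => rfl
  | append_singleton ws w ih =>
    rw [List.foldl_append, List.foldl_append]
    simp only [List.foldl_cons, List.foldl_nil]
    rw [← innerA]
    rw [innerA_eq, word_eq, wordB_eq, perword_eq, ih]

-- ===== VERDICT (by name: the statement is the Claim_ definition above) =====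
theorem NonAlpha_spec : Claim_equal_NonAlpha := by
  intro data _
  exact main_eq data
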